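-- pv_equiv track=rewrite | github.com/QuBenhao/LeetCode | problems/1600/solution.py | solve
-- ===== SOURCE A (Python) =====
-- from collections import defaultdict
--
-- def solve(test_input=None):
--     # Your ThroneInheritance object will be instantiated and called as such:
--     # obj = ThroneInheritance(kingName)
--     # obj.birth(parentName,childName)
--     # obj.death(name)
--     # param_3 = obj.getInheritanceOrder()
--     ops, vals = test_input
--     ans = [None]
--     obj = ThroneInheritance(vals[0][0])
--     for i in range(1, len(ops)):
--         if ops[i] == "birth":
--             parent, child = vals[i]
--             obj.birth(parent, child)
--             ans.append(None)
--         elif ops[i] == "death":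
--             obj.death(vals[i][0])
--             ans.append(None)
--         else:
--             ans.append(obj.getInheritanceOrder())
--     return ans
--
-- class ThroneInheritance(object):
--
--     def __init__(self, kingName):
--         """
--         :type kingName: str
--         """
--         self.root = kingName
--         # parent -> children
--         self.tree = defaultdict(list)
--         self.deads = set()
--
--     def birth(self, parentName, childName):
--         """
--         :type parentName: str
--         :type childName: str
--         :rtype: None
--         """
--         self.tree[parentName].append(childName)
--
--     def death(self, name):
--         """
--         :type name: str
--         :rtype: None
--         """
--         self.deads.add(name)
--
--     def getInheritanceOrder(self):
--         """
--         :rtype: List[str]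
--         """
--         """
--         Successor(x, curOrder):
--         如果 x 没有孩子或者所有 x 的孩子都在 curOrder 中：
--             如果 x 是国王，那么返回 null
--             否则，返回 Successor(x 的父亲, curOrder)
--         否则，返回 x 不在 curOrder 中最年长的孩子
--         """
--         def preOrder(node):
--             if node not in self.deads:
--                 yield node
--             if node in self.tree:
--                 for child in self.tree[node]:
--                     yield from preOrder(child)
--         return list(preOrder(self.root))
-- ===== SOURCE B (Python) =====
-- def solve(test_input=None):
--     # Same birth/death bookkeeping; getInheritanceOrder is an explicit-stack
--     # iterative preorder instead of A's recursive generator, and the driver is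
--     # an index while-loop instead of a for over range.
--     ops, vals = test_input
--     root = vals[0][0]
--     children = {}
--     dead = set()
--     out = [None]
--     i = 1
--     while i < len(ops):
--         op = ops[i]
--         if op == "birth":
--             parent, child = vals[i]
--             children.setdefault(parent, []).append(child)
--             out.append(None)
--         elif op == "death":
--             dead.add(vals[i][0])
--             out.append(None)
--         else:
--             order = []
--             stack = [root]
--             while stack:
--                 node = stack.pop()
--                 if node not in dead:
--                     order.append(node)
--                 if node in children:
--                     stack.extend(reversed(children[node]))
--             out.append(order)
--         i += 1
--     return out
-- ===== Notes on version B (the rewrite author's own statement) =====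
-- stated objective: alternative
-- what changed: getInheritanceOrder is re-implemented as an iterative preorder with an explicit stack (pop a node, emit it if alive, push its children reversed) instead of A's recursive generator, and the driver is an index-carrying while-loop instead of a for over range(1, len(ops)).
import Mathlib
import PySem

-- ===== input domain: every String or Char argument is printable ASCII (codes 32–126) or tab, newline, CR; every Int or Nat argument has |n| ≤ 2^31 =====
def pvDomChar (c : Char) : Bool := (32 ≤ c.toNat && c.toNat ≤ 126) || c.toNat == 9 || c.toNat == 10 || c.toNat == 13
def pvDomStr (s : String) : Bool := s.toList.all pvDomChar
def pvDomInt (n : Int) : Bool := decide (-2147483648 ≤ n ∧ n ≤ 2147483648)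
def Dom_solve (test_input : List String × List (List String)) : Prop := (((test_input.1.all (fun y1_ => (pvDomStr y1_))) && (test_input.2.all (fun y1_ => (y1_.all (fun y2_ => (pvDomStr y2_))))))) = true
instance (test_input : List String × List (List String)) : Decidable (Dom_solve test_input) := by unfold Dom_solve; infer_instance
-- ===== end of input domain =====

-- B replaces A's recursive-generator preorder by an explicit-stack iterative preorder
-- and its driver is an index-carrying while-loop instead of a fold over range(1, len(ops))
-- (objective: alternative).


-- ===== PORT A =====
-- A's recursive generator preOrder(node), totalized with fuel (one unit per visited
-- node; the pair is (yielded nodes, units consumed), so 'f - r.2' is the fuel left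
-- after a sub-recursion). The sibling loop 'for child in tree[node]: yield from
-- preOrder(child)' is the recursion on cs; A's call preOrder(self.root) is
-- preA … fuel [root]. On every input admitted by Pre_solve the fuel
-- (ops.length+2)^(2*ops.length+3) exceeds the number of visited nodes (the
-- unfolded DAG has ≤ sum of n^d over depths d ≤ 2n+1 nodes), so the fuel is
-- never exhausted and this computes exactly A's preorder.
def preA (tree : PySem.Dict String (List String)) (deads : PySem.Set String) :
    Nat → List String → List String × Nat
  | 0, _ => ([], 0)
  | _ + 1, [] => ([], 0)
  | f + 1, n :: cs =>
      -- if node not in self.deads: yield node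
      let v : List String := if PySem.Set.contains deads n then [] else [n]
      -- if node in self.tree: for child in self.tree[node]: yield from preOrder(child)
      let r : List String × Nat :=
        if (PySem.Dict.get? tree n).isSome then
          preA tree deads f (PySem.Dict.getD tree n [])
        else ([], 0)
      let r2 := preA tree deads (f - r.2) cs
      (v ++ r.1 ++ r2.1, 1 + r.2 + r2.2)
  termination_by f _ => f
  decreasing_by all_goals omega

-- the body of A's 'for i in range(1, len(ops))' loop, as the fold step
def stepA (ops : List String) (vals : List (List String)) (fuel : Nat) (root : String)
    (st : List (Option (List String)) × PySem.Dict String (List String) × PySem.Set String)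
    (i : Int) :
    List (Option (List String)) × PySem.Dict String (List String) × PySem.Set String :=
  let op := PySem.List.pyGetD ops i ""
  if op = "birth" then
    let vi := PySem.List.pyGetD vals i []
    (st.1 ++ [none],
     PySem.Dict.modify st.2.1 (PySem.List.pyGetD vi 0 "") []
       (fun l => l ++ [PySem.List.pyGetD vi 1 ""]),   -- defaultdict: tree[parent].append(child)
     st.2.2)
  else if op = "death" then
    (st.1 ++ [none], st.2.1,
     PySem.Set.add st.2.2 (PySem.List.pyGetD (PySem.List.pyGetD vals i []) 0 ""))
  else
    (st.1 ++ [some (preA st.2.1 st.2.2 fuel [root]).1], st.2.1, st.2.2)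

def solve (test_input : List String × List (List String)) : List (Option (List String)) :=
  let ops := test_input.1
  let vals := test_input.2
  let root := (vals.headD []).headD ""            -- ThroneInheritance(vals[0][0])
  let fuel := (ops.length + 2) ^ (2 * ops.length + 3)   -- totalization fuel; ample under Pre_solve
  ((PySem.List.pyRange 1 (ops.length : Int) 1).foldl (stepA ops vals fuel root)
    ([none], PySem.Dict.empty, PySem.Set.empty)).1

-- ===== PORT B =====
-- B's inner while-loop over an explicit stack, with the result list as
-- accumulator. The Lean list holds B's Python stack reversed (head = top), so
-- 'stack.extend(reversed(children[node]))' is prepending the children in order.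
def stackGo (tree : PySem.Dict String (List String)) (deads : PySem.Set String) :
    Nat → List String → List String → List String
  | 0, _, acc => acc
  | _ + 1, [], acc => acc
  | f + 1, n :: rest, acc =>
      let acc' := if PySem.Set.contains deads n then acc else acc ++ [n]
      let rest' := if (PySem.Dict.get? tree n).isSome then
          PySem.Dict.getD tree n [] ++ rest
        else rest
      stackGo tree deads f rest' acc'

-- B's outer 'while i < len(ops)' loop: i, children, dead and out are carried as
-- parameters; ops.length is enough fuel since i increases by 1 each pass.
def loopB (ops : List String) (vals : List (List String)) (root : String) (pfuel : Nat) :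
    Nat → Nat → PySem.Dict String (List String) → PySem.Set String →
    List (Option (List String)) → List (Option (List String))
  | 0, _, _, _, out => out
  | f + 1, i, children, dead, out =>
      if i < ops.length then
        let op := PySem.List.pyGetD ops (i : Int) ""
        if op = "birth" then
          let vi := PySem.List.pyGetD vals (i : Int) []
          loopB ops vals root pfuel f (i + 1)
            (PySem.Dict.modify children (PySem.List.pyGetD vi 0 "") []
              (fun l => l ++ [PySem.List.pyGetD vi 1 ""]))   -- children.setdefault(parent, []).append(child)
            dead (out ++ [none])
        else if op = "death" then
          loopB ops vals root pfuel f (i + 1) children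
            (PySem.Set.add dead (PySem.List.pyGetD (PySem.List.pyGetD vals (i : Int) []) 0 ""))
            (out ++ [none])
        else
          loopB ops vals root pfuel f (i + 1) children dead
            (out ++ [some (stackGo children dead pfuel [root] [])])
      else out

def solve_alt (test_input : List String × List (List String)) : List (Option (List String)) :=
  let ops := test_input.1
  let vals := test_input.2
  let root := (vals.headD []).headD ""
  let pfuel := (ops.length + 2) ^ (2 * ops.length + 3)   -- totalization fuel; ample under Pre_solve
  loopB ops vals root pfuel ops.length 1 PySem.Dict.empty PySem.Set.empty [none]

-- ===== PRECONDITION & SPEC =====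
-- the birth edges (parent, child) recorded by the operations strictly before index i
def birthEdges (ops : List String) (vals : List (List String)) (i : Nat) :
    List (String × String) :=
  (List.range i).filterMap (fun j =>
    if 1 ≤ j ∧ ops.getD j "" = "birth" then
      some ((vals.getD j []).getD 0 "", (vals.getD j []).getD 1 "")
    else none)

-- one step of reachability closure over the edge list E
def reachStep (E : List (String × String)) (S : List String) : List String :=
  S ++ (E.filter (fun e => S.contains e.1 && !(S.contains e.2))).map Prod.snd

def reachClose (E : List (String × String)) : Nat → List String → List String
  | 0, S => S
  | n + 1, S => reachClose E n (reachStep E S)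

-- some node reachable from root lies on a directed cycle of E (E.length+1
-- closure steps reach the membership fixed point: each non-trivial step adds
-- a new distinct edge target)
def hasRootCycle (E : List (String × String)) (root : String) : Bool :=
  (reachClose E (E.length + 1) [root]).any (fun v =>
    (reachClose E (E.length + 1) ((E.filter (fun e => e.1 == v)).map Prod.snd)).contains v)

-- Pre_solve: exactly the inputs on which A returns normally — vals[0][0] exists
-- (else IndexError); every birth op has a length-2 value list and every death op a
-- nonempty one at its index (else IndexError/ValueError); and whenever a query op is
-- executed, the birth graph built so far has no cycle reachable from the king (on a
-- reachable cycle A's preOrder recursion never terminates: RecursionError).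
-- the op at index i does not raise: a birth finds a length-2 value list, a death a
-- nonempty one, and a query is run while the birth graph has no king-reachable cycle
def okOpAt (ops : List String) (vals : List (List String)) (root : String) (i : Nat) : Bool :=
  if ops.getD i "" = "birth" then
    decide (i < vals.length ∧ (vals.getD i []).length = 2)
  else if ops.getD i "" = "death" then
    decide (i < vals.length ∧ vals.getD i [] ≠ [])
  else !(hasRootCycle (birthEdges ops vals i) root)

def Pre_solve (test_input : List String × List (List String)) : Prop :=
  test_input.2 ≠ [] ∧ test_input.2.headD [] ≠ [] ∧
  (∀ i : Nat, i < test_input.1.length → 1 ≤ i →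
     okOpAt test_input.1 test_input.2 ((test_input.2.headD []).headD "") i = true)
instance (test_input : List String × List (List String)) : Decidable (Pre_solve test_input) := by
  unfold Pre_solve; infer_instance

def pvWitness_solve : (List String × List (List String)) :=
  (["ThroneInheritance", "birth", "death", "getInheritanceOrder"],
   [["king"], ["king", "alice"], ["king"], []])

def Spec_solve (test_input : List String × List (List String)) (out : List (Option (List String))) : Prop := out = solve_alt test_input
instance (test_input : List String × List (List String)) (out : List (Option (List String))) : Decidable (Spec_solve test_input out) := by unfold Spec_solve; infer_instance

-- ===== CLAIM (what is proved, stated in full; the proofs are below) =====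
def Claim_equal_solve : Prop := ∀ (test_input : List String × List (List String)), Dom_solve test_input → Pre_solve test_input → Spec_solve test_input (solve test_input)

-- ===== LEMMAS AND PROOFS =====

lemma stackGo_nil (tree : PySem.Dict String (List String)) (deads : PySem.Set String)
    (f : Nat) (acc : List String) : stackGo tree deads f [] acc = acc := by
  cases f <;> rfl

-- Core correspondence: running the stack on xs ++ ys first consumes xs exactly as
-- the recursive preorder does (same yield, same fuel), for EVERY fuel value.
lemma stackGo_append (tree : PySem.Dict String (List String)) (deads : PySem.Set String) :
    ∀ (f : Nat) (xs ys acc : List String),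
      stackGo tree deads f (xs ++ ys) acc
        = stackGo tree deads (f - (preA tree deads f xs).2) ys
            (acc ++ (preA tree deads f xs).1) := by
  intro f
  induction f using Nat.strong_induction_on with
  | _ f IH =>
    intro xs ys acc
    match f, xs with
    | f, [] =>
        cases f <;> simp [preA]
    | 0, n :: xs' =>
        simp [preA, stackGo]
    | g + 1, n :: xs' =>
        rw [show (n :: xs') ++ ys = n :: (xs' ++ ys) from rfl]
        by_cases hn : (PySem.Dict.get? tree n).isSome
        · rw [stackGo, preA]
          simp only [hn, if_true]
          rw [IH g (by omega) (PySem.Dict.getD tree n []) (xs' ++ ys)]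
          rw [IH (g - (preA tree deads g (PySem.Dict.getD tree n [])).2) (by omega) xs' ys]
          rw [show g - (preA tree deads g (PySem.Dict.getD tree n [])).2 -
                (preA tree deads (g - (preA tree deads g (PySem.Dict.getD tree n [])).2) xs').2
              = g + 1 - (1 + (preA tree deads g (PySem.Dict.getD tree n [])).2 +
                  (preA tree deads (g - (preA tree deads g (PySem.Dict.getD tree n [])).2) xs').2)
            from by omega]
          by_cases hd : n ∈ deads <;> simp [hd]
        · rw [stackGo, preA]
          simp only [hn, Bool.false_eq_true, if_false]
          rw [IH g (by omega) xs' ys]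
          simp only [Nat.sub_zero]
          rw [show g - (preA tree deads g xs').2
              = g + 1 - (1 + 0 + (preA tree deads g xs').2) from by omega]
          by_cases hd : n ∈ deads <;> simp [hd]

lemma stackGo_eq_preA (tree : PySem.Dict String (List String)) (deads : PySem.Set String)
    (f : Nat) (cs : List String) :
    stackGo tree deads f cs [] = (preA tree deads f cs).1 := by
  have h := stackGo_append tree deads f cs [] []
  simpa [stackGo_nil] using h

-- B's while-loop from index i computes A's fold over range(i, len(ops)), for any
-- loop fuel f with len(ops) ≤ i + f and any shared preorder fuel g.
lemma loopB_eq_foldl (ops : List String) (vals : List (List String)) (root : String)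
    (g : Nat) :
    ∀ (f i : Nat) (tree : PySem.Dict String (List String)) (dead : PySem.Set String)
      (out : List (Option (List String))), ops.length ≤ i + f →
      loopB ops vals root g f i tree dead out
        = ((PySem.List.pyRange (i : Int) (ops.length : Int) 1).foldl
            (stepA ops vals g root) (out, tree, dead)).1 := by
  intro f
  induction f with
  | zero =>
      intro i tree dead out hle
      rw [PySem.List.pyRange_one_eq_nil (by exact_mod_cast hle)]
      rfl
  | succ f IH =>
      intro i tree dead out hle
      by_cases hi : i < ops.length
      · rw [PySem.List.pyRange_one_cons (by exact_mod_cast hi), List.foldl_cons]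
        have hcast : ((i + 1 : Nat) : Int) = (i : Int) + 1 := by push_cast; ring
        simp only [loopB, hi, if_true]
        by_cases hb : PySem.List.pyGetD ops (i : Int) "" = "birth"
        · rw [if_pos hb, IH (i + 1) _ _ _ (by omega), hcast]
          simp only [stepA]
          rw [if_pos hb]
        · by_cases hd : PySem.List.pyGetD ops (i : Int) "" = "death"
          · rw [if_neg hb, if_pos hd, IH (i + 1) _ _ _ (by omega), hcast]
            simp only [stepA]
            rw [if_neg hb, if_pos hd]
          · rw [if_neg hb, if_neg hd, IH (i + 1) _ _ _ (by omega), hcast]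
            simp only [stepA]
            rw [if_neg hb, if_neg hd, stackGo_eq_preA]
      · rw [PySem.List.pyRange_one_eq_nil (by exact_mod_cast (by omega : ops.length ≤ i))]
        simp only [loopB, hi, if_false]
        rfl

-- ===== VERDICT (by name: the statement is the Claim_ definition above) =====
theorem solve_spec : Claim_equal_solve := by
  intro ti _hdom _hpre
  unfold Spec_solve solve solve_alt
  rw [loopB_eq_foldl ti.1 ti.2 ((ti.2.headD []).headD "")
        ((ti.1.length + 2) ^ (2 * ti.1.length + 3)) ti.1.length 1
        PySem.Dict.empty PySem.Set.empty [none] (by omega)]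
  norm_num
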